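-- pv_equiv track=rewrite | github.com/jhonnold/unique-sub-sums | uniqueSubSums.py | uniqueSubSums
-- ===== SOURCE A (Python) =====
-- import itertools
--
-- def uniqueSubSums(array):
--     sums = []
--     for x in range(1, len(array)):
--         for s in itertools.combinations(array, x):
--             s = sum(s)
--             if (s in sums):
--                 return False
--             else:
--                 sums.append(s)
--     return True
-- ===== SOURCE B (Python) =====
-- def uniqueSubSums(array):
--     # Collect the multiset of all 2^n subset sums by doubling, then drop one
--     # empty-subset sum (0) and one full-subset sum, and compare cardinalities.
--     if not array:
--         return True
--     sums = [0]
--     for x in array: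
--         sums = sums + [s + x for s in sums]
--     proper = list(sums)
--     proper.remove(0)
--     proper.remove(sum(array))
--     return len(proper) == len(set(proper))
-- ===== Notes on version B (the rewrite author's own statement) =====
-- stated objective: alternative
-- what changed: A probes a growing sums list with a membership check and early-returns inside nested size-by-size combination loops; B instead builds the multiset of all 2^n subset sums by a doubling pass, drops one empty-subset and one full-subset sum, and decides distinctness by comparing the list's length with its set's.
import Mathlib
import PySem

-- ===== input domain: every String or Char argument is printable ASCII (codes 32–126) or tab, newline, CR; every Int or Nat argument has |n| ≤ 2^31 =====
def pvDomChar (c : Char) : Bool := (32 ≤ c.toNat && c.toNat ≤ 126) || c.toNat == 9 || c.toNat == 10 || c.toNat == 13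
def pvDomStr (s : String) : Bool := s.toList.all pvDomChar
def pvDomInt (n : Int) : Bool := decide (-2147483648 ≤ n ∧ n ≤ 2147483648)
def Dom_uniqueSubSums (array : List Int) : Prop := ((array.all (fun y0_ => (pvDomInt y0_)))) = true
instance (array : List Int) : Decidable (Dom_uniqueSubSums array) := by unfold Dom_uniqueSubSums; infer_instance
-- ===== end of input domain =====

-- B replaces A's size-by-size combination enumeration with a dup-check and early
-- return by a subset-sum-doubling pass that collects ALL subset sums, drops the
-- empty- and full-subset sums, and compares the list's length with its set's
-- (objective: alternative decomposition, not claimed faster).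

-- ===== PORT A =====
-- inner loop: 'for s in itertools.combinations(array, x): …' with early 'return False'
def uniqueSubSums_aInner (sums : List Int) (cs : List (List Int)) : Option (List Int) :=
  match cs with
  | [] => some sums
  | c :: rest =>
    let s := c.sum
    if sums.contains s then none
    else uniqueSubSums_aInner (sums ++ [s]) rest

-- outer loop: 'for x in range(1, len(array)): …'
def uniqueSubSums_aOuter (array : List Int) (sums : List Int) (ks : List Int) : Bool :=
  match ks with
  | [] => true
  | k :: rest =>
    match uniqueSubSums_aInner sums (PySem.List.combinations array k.toNat) with
    | none => false
    | some sums' => uniqueSubSums_aOuter array sums' rest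

def uniqueSubSums (array : List Int) : Bool :=
  uniqueSubSums_aOuter array [] (PySem.List.pyRange 1 (array.length : Int) 1)

-- ===== PORT B =====
def uniqueSubSums_alt (array : List Int) : Bool :=
  if array = [] then true
  else
    -- sums = [0]; for x in array: sums = sums + [s + x for s in sums]
    let sums := array.foldl (fun sums x => sums ++ sums.map (fun s => s + x)) [0]
    -- proper = list(sums); proper.remove(0); proper.remove(sum(array))
    -- (both removes always succeed in Python here; the 'none' arms are unreachable)
    match PySem.List.remove? sums 0 with
    | none => false
    | some p1 =>
      match PySem.List.remove? p1 array.sum with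
      | none => false
      | some proper => proper.length == (PySem.Set.ofList proper).length

-- ===== PRECONDITION & SPEC =====
def Spec_uniqueSubSums (array : List Int) (out : Bool) : Prop := out = uniqueSubSums_alt array
instance (array : List Int) (out : Bool) : Decidable (Spec_uniqueSubSums array out) := by unfold Spec_uniqueSubSums; infer_instance

-- ===== CLAIM (what is proved, stated in full; the proofs are below) =====
def Claim_equal_uniqueSubSums : Prop := ∀ (array : List Int), Dom_uniqueSubSums array → Spec_uniqueSubSums array (uniqueSubSums array)

-- ===== LEMMAS AND PROOFS =====

-- sums of the size-k combinations
def pvTk (l : List Int) (k : Nat) : List Int := (PySem.List.combinations l k).map List.sum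

-- all 2^n subset sums, grouped by size
def pvFlat (l : List Int) : List Int := (List.range (l.length + 1)).flatMap (pvTk l)

-- all 2^n subset sums, by doubling (recursive reference form of B's fold)
def pvSS : List Int → List Int
  | [] => [0]
  | x :: l => pvSS l ++ (pvSS l).map (· + x)

-- flatMap distributes (up to permutation) over pointwise append
lemma pv_flatMap_append_perm {α β : Type} [DecidableEq β] (s : List α) (g h : α → List β) :
    (s.flatMap (fun a => g a ++ h a)).Perm (s.flatMap g ++ s.flatMap h) := by
  induction s with
  | nil => simp
  | cons a s ih =>
    simp only [List.flatMap_cons]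
    refine (List.Perm.append_left _ ih).trans ?_
    refine List.perm_iff_count.mpr fun b => ?_
    simp only [List.count_append]
    omega

-- B's fold is a convolution of the seed with pvSS
lemma pv_foldl_perm (l : List Int) : ∀ s : List Int,
    (List.foldl (fun sums x => sums ++ sums.map (fun s => s + x)) s l).Perm
      (s.flatMap (fun a => (pvSS l).map (a + ·))) := by
  induction l with
  | nil => intro s; simp [pvSS]
  | cons x l ih =>
    intro s
    simp only [List.foldl_cons]
    refine (ih _).trans ?_
    rw [List.flatMap_append, List.flatMap_map]
    have h2 : (s.flatMap fun a => (pvSS l).map ((a + x) + ·))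
        = s.flatMap fun a => ((pvSS l).map (· + x)).map (a + ·) := by
      congr 1
      funext a
      rw [List.map_map]
      exact List.map_congr_left (fun b _ => by dsimp; ring)
    rw [h2]
    refine List.Perm.trans (pv_flatMap_append_perm s (fun a => (pvSS l).map (a + ·))
      (fun a => ((pvSS l).map (· + x)).map (a + ·))).symm (List.Perm.of_eq ?_)
    congr 1
    funext a
    simp [pvSS]

-- pvSS is (a permutation of) the size-grouped combination sums
lemma pv_ss_perm_flat : ∀ l : List Int, (pvSS l).Perm (pvFlat l) := by
  intro l
  induction l with
  | nil => simp [pvSS, pvFlat, pvTk, PySem.List.combinations_zero]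
  | cons x t ih =>
    have hTsucc : ∀ k : Nat, pvTk (x :: t) (k + 1)
        = (pvTk t k).map (· + x) ++ pvTk t (k + 1) := by
      intro k
      simp only [pvTk, PySem.List.combinations_cons_succ, List.map_append, List.map_map]
      refine congrArg (· ++ _) ?_
      exact List.map_congr_left (fun c _ => by simp [Function.comp]; ring)
    have hM : pvFlat t = 0 :: (List.range t.length).flatMap (fun k => pvTk t (k + 1)) := by
      simp only [pvFlat, List.range_succ_eq_map, List.flatMap_cons, List.flatMap_map,
        pvTk, PySem.List.combinations_zero]
      simp [Nat.succ_eq_add_one]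
    have hsplit : pvFlat (x :: t)
        = [0] ++ (List.range (t.length + 1)).flatMap (fun k => pvTk (x :: t) (k + 1)) := by
      simp only [pvFlat, List.length_cons, List.range_succ_eq_map, List.flatMap_cons,
        List.flatMap_map, pvTk, PySem.List.combinations_zero]
      simp [Nat.succ_eq_add_one]
    have hB : (List.range (t.length + 1)).flatMap (fun k => pvTk t (k + 1))
        = (List.range t.length).flatMap (fun k => pvTk t (k + 1)) := by
      rw [List.range_succ, List.flatMap_append]
      simp [pvTk, PySem.List.combinations_eq_nil_of_length_lt t (Nat.lt_succ_self _)]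
    show (pvSS t ++ (pvSS t).map (· + x)).Perm (pvFlat (x :: t))
    refine (List.Perm.append ih (ih.map _)).trans ?_
    rw [hsplit]
    have h1 : List.flatMap (fun k => pvTk (x :: t) (k + 1)) (List.range (t.length + 1))
        = List.flatMap (fun k => (pvTk t k).map (· + x) ++ pvTk t (k + 1))
            (List.range (t.length + 1)) := by
      congr 1
      funext k
      exact hTsucc k
    rw [h1]
    refine List.Perm.trans ?_ (List.Perm.append_left [0]
      (pv_flatMap_append_perm _ _ _).symm)
    have h2 : List.flatMap (fun k => (pvTk t k).map (· + x)) (List.range (t.length + 1))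
        = (pvFlat t).map (· + x) := by
      simp [pvFlat, List.map_flatMap]
    rw [h2, hB, hM]
    refine List.perm_iff_count.mpr fun b => ?_
    simp [List.count_append, List.count_cons]
    omega

-- A's inner loop scans and appends: it succeeds exactly on a Nodup extension
lemma pv_aInner_eq (cs : List (List Int)) : ∀ sums : List Int, sums.Nodup →
    uniqueSubSums_aInner sums cs
      = if (sums ++ cs.map List.sum).Nodup then some (sums ++ cs.map List.sum) else none := by
  induction cs with
  | nil => intro sums h; simp [uniqueSubSums_aInner, h]
  | cons c rest ih =>
    intro sums h
    by_cases hm : c.sum ∈ sums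
    · have hbad : ¬ (sums ++ c.sum :: rest.map List.sum).Nodup := by
        rw [List.nodup_append]
        rintro ⟨-, -, hdisj⟩
        exact hdisj _ hm c.sum (by simp) rfl
      simp [uniqueSubSums_aInner, List.contains_eq_mem, hm, hbad]
    · have hnd : (sums ++ [c.sum]).Nodup := by
        rw [List.nodup_append]
        refine ⟨h, List.nodup_singleton _, ?_⟩
        intro a ha b hb heq
        rcases List.mem_singleton.mp hb with rfl
        exact hm (heq ▸ ha)
      have := ih (sums ++ [c.sum]) hnd
      simp only [uniqueSubSums_aInner, List.contains_eq_mem, hm, decide_false,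
        Bool.false_eq_true, if_false, this, List.append_assoc, List.singleton_append,
        List.map_cons]
    
-- A's outer loop succeeds exactly when the accumulated sums stay Nodup
lemma pv_aOuter_iff (array : List Int) (ks : List Int) : ∀ sums : List Int, sums.Nodup →
    (uniqueSubSums_aOuter array sums ks = true
      ↔ (sums ++ ks.flatMap (fun k => pvTk array k.toNat)).Nodup) := by
  induction ks with
  | nil => intro sums h; simpa [uniqueSubSums_aOuter] using h
  | cons k rest ih =>
    intro sums h
    rw [uniqueSubSums_aOuter, pv_aInner_eq _ sums h]
    by_cases hnd : (sums ++ (PySem.List.combinations array k.toNat).map List.sum).Nodup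
    · rw [if_pos hnd]
      rw [ih _ hnd]
      simp [pvTk, List.append_assoc]
    · rw [if_neg hnd]
      simp only [Bool.false_eq_true, false_iff]
      intro hall
      rw [List.flatMap_cons, ← List.append_assoc] at hall
      exact hnd ((List.sublist_append_left _ _).nodup (by simpa [pvTk] using hall))

lemma pv_foldl_add_eq_of_nodup : ∀ (l s : List Int), (s ++ l).Nodup →
    List.foldl PySem.Set.add s l = s ++ l := by
  intro l
  induction l with
  | nil => intro s _; simp
  | cons x t ih =>
    intro s h
    have hx : x ∉ s := by
      rw [List.nodup_append] at h
      exact fun hm => h.2.2 x hm x (by simp) rfl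
    rw [List.foldl_cons]
    have hadd : PySem.Set.add s x = s ++ [x] := by
      simp [PySem.Set.add, PySem.Set.contains, List.contains_eq_mem, hx]
    rw [hadd, ih (s ++ [x]) (by simpa using h)]
    simp

lemma pv_foldl_add_len_lt : ∀ (l s : List Int),
    ((∃ x ∈ l, x ∈ s) ∨ ¬ l.Nodup) →
    (List.foldl PySem.Set.add s l).length < s.length + l.length := by
  intro l
  induction l with
  | nil => rintro s (⟨x, hx, -⟩ | h) <;> simp_all
  | cons y t ih =>
    intro s h
    rw [List.foldl_cons]
    by_cases hy : y ∈ s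
    · have hadd : PySem.Set.add s y = s := by
        simp [PySem.Set.add, PySem.Set.contains, List.contains_eq_mem, hy]
      rw [hadd]
      have hle : ∀ (t : List Int) (s : List Int),
          (List.foldl PySem.Set.add s t).length ≤ s.length + t.length := by
        intro t
        induction t with
        | nil => simp
        | cons z u ihu =>
          intro s
          rw [List.foldl_cons]
          refine le_trans (ihu _) ?_
          by_cases hz : z ∈ s
          · simp [PySem.Set.add, PySem.Set.contains, List.contains_eq_mem, hz]
          · simp [PySem.Set.add, PySem.Set.contains, List.contains_eq_mem, hz]
            omega
      have := hle t s
      simp only [List.length_cons]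
      omega
    · have hadd : PySem.Set.add s y = s ++ [y] := by
        simp [PySem.Set.add, PySem.Set.contains, List.contains_eq_mem, hy]
      rw [hadd]
      have hnext : (∃ x ∈ t, x ∈ s ++ [y]) ∨ ¬ t.Nodup := by
        rcases h with ⟨x, hx, hxs⟩ | hnd
        · rcases List.mem_cons.mp hx with rfl | hxt
          · exact absurd hxs hy
          · exact Or.inl ⟨x, hxt, by simp [hxs]⟩
        · by_cases hyt : y ∈ t
          · exact Or.inl ⟨y, hyt, by simp⟩
          · exact Or.inr (fun hnt => hnd (List.nodup_cons.mpr ⟨hyt, hnt⟩))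
      have hlt := ih (s ++ [y]) hnext
      simp only [List.length_append, List.length_singleton] at hlt
      simp only [List.length_cons]
      omega

lemma pv_set_len_iff (l : List Int) :
    ((PySem.Set.ofList l).length = l.length) ↔ l.Nodup := by
  constructor
  · intro h
    by_contra hnd
    have := pv_foldl_add_len_lt l [] (Or.inr hnd)
    rw [← PySem.Set.ofList_eq_foldl] at this
    simp [h] at this
  · intro h
    rw [PySem.Set.ofList_eq_foldl, pv_foldl_add_eq_of_nodup l [] (by simpa using h)]
    simp

-- the doubling list is a permutation of 0 :: total :: (proper nonempty sums)
lemma pv_dp_perm (x : Int) (t : List Int) :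
    (List.foldl (fun sums x => sums ++ sums.map (fun s => s + x)) [0] (x :: t)).Perm
      (0 :: (x :: t).sum ::
        (List.range t.length).flatMap (fun k => pvTk (x :: t) (k + 1))) := by
  set l := x :: t with hl
  have h1 := pv_foldl_perm l [0]
  have h2 : ([0] : List Int).flatMap (fun a => (pvSS l).map (a + ·)) = pvSS l := by
    simp
  rw [h2] at h1
  refine h1.trans ((pv_ss_perm_flat l).trans ?_)
  have hn : l.length = t.length + 1 := by simp [hl]
  have hflat : pvFlat l = [0] ++ ((List.range t.length).flatMap (fun k => pvTk l (k + 1))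
      ++ [l.sum]) := by
    rw [pvFlat, hn, List.range_succ_eq_map, List.flatMap_cons]
    have : pvTk l 0 = [0] := by simp [pvTk, PySem.List.combinations_zero]
    rw [this, List.flatMap_map]
    congr 1
    have : (fun k : Nat => pvTk l k.succ) = fun k : Nat => pvTk l (k + 1) := rfl
    rw [this, List.range_succ, List.flatMap_append]
    congr 1
    have : pvTk l (t.length + 1) = [l.sum] := by
      have := PySem.List.combinations_length_self l
      rw [hn] at this
      simp [pvTk, this]
    simp [this]
  rw [hflat, List.perm_iff_count]
  intro b; simp [List.count_append, List.count_cons]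

-- ===== VERDICT (by name: the statement is the Claim_ definition above) =====
theorem uniqueSubSums_spec : Claim_equal_uniqueSubSums := by
  intro array _
  unfold Spec_uniqueSubSums
  match harr : array with
  | [] =>
    simp [uniqueSubSums, uniqueSubSums_alt, uniqueSubSums_aOuter,
      PySem.List.pyRange_one_eq_nil (by simp : (0:Int) ≤ 1)]
  | x :: t =>
    -- both sides are true iff the proper nonempty subset sums are Nodup
    set l := x :: t with hl
    set Asums : List Int := (List.range t.length).flatMap (fun k => pvTk l (k + 1))
      with hAsums
    -- A side
    have hA : (uniqueSubSums l = true) ↔ Asums.Nodup := by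
      rw [uniqueSubSums, pv_aOuter_iff l _ [] List.nodup_nil]
      rw [List.nil_append]
      have hrange : PySem.List.pyRange 1 (l.length : Int) 1
          = (List.range t.length).map (fun k : Nat => 1 + (k : Int)) := by
        rw [PySem.List.pyRange_one]
        congr 1
        simp [hl]
      rw [hrange, List.flatMap_map]
      have : (fun k : Nat => pvTk l (1 + (k : Int)).toNat) = fun k : Nat => pvTk l (k + 1) := by
        funext k
        congr 1
        omega
      rw [this]
    -- B side
    have hdp := pv_dp_perm x t
    rw [← hl, ← hAsums] at hdp
    have h0mem : (0 : Int) ∈ List.foldl (fun sums x => sums ++ sums.map (fun s => s + x)) [0] l := by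
      rw [hdp.mem_iff]; simp
    have hrm1 := PySem.List.remove?_eq_some_erase _ _ h0mem
    have hperm1 : ((List.foldl (fun sums x => sums ++ sums.map (fun s => s + x)) [0] l).erase 0).Perm
        (l.sum :: Asums) := by
      have := hdp.erase 0
      simpa using this
    have hsmem : l.sum ∈ (List.foldl (fun sums x => sums ++ sums.map (fun s => s + x)) [0] l).erase 0 := by
      rw [hperm1.mem_iff]; simp
    have hrm2 := PySem.List.remove?_eq_some_erase _ _ hsmem
    have hperm2 : (((List.foldl (fun sums x => sums ++ sums.map (fun s => s + x)) [0] l).erase 0).erase l.sum).Perm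
        Asums := by
      have := hperm1.erase l.sum
      simpa using this
    have hB : (uniqueSubSums_alt l = true) ↔ Asums.Nodup := by
      simp only [uniqueSubSums_alt, if_neg (show ¬ l = [] by simp [hl])]
      simp only [hrm1]
      simp only [hrm2]
      simp only [beq_iff_eq]
      rw [eq_comm, pv_set_len_iff]
      exact hperm2.nodup_iff
    rw [Bool.eq_iff_iff, hA, hB]
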